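-- pv_equiv track=rewrite | github.com/SonarWAN/sonarwan | sonarwan/handlers.py | get_significant_name_from_url
-- ===== SOURCE A (Python) =====
-- def get_significant_name_from_url(url):
--     """Detects from right to left word (between dots) bigger than 3 chars.
--
--     Example:
--         www.infobae.com.ar -> infobae
--         itba.edu.ar -> itba
--         w1.wp.com -> w1.wp.com
--     """
--     chars = 3
--     count = 0
--     last_period = len(url)
--     for i in range(len(url) - 1, -1, -1):
--         if url[i] == '.':
--             if count > chars:
--                 return url[i + 1:last_period]
--             else:
--                 count = 0
--                 last_period = i
--         else:
--             count += 1
--     if count > chars: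
--         return url[0:last_period]
--     else:
--         return url
-- ===== SOURCE B (Python) =====
-- def get_significant_name_from_url(url):
--     parts = url.split('.')
--     for part in reversed(parts):
--         if len(part) > 3:
--             return part
--     return url
-- ===== Notes on version B (the rewrite author's own statement) =====
-- stated objective: simpler
-- what changed: Replaces the right-to-left character scan with count/last_period bookkeeping and manual slicing by a split on the dot separator followed by a scan over the reversed segment list returning the first segment longer than 3 chars.
import Mathlib
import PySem

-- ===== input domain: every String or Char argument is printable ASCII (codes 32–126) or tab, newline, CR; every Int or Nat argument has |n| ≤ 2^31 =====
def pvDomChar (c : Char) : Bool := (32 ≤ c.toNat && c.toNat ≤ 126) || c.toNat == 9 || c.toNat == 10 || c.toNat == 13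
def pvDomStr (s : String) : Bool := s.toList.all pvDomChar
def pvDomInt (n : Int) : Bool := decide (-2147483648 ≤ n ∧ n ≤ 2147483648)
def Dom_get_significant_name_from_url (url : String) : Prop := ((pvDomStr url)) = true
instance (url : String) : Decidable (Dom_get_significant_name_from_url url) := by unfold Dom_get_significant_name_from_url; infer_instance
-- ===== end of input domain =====

-- B replaces A's right-to-left character scan (count/last_period bookkeeping + slicing) by a
-- split on '.' followed by a scan over the reversed segment list; objective: simpler.

-- ===== PORT A =====
-- the for-loop 'for i in range(len(url)-1, -1, -1)' as a countdown recursion; in the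
-- 'i+1' case the current Python index is 'i'
def aLoop (url : List Char) (i : Nat) (count : Int) (last_period : Int) : List Char :=
  match i with
  | 0 => if count > 3 then PySem.List.slice url (some 0) (some last_period) else url
  | i' + 1 =>
    if PySem.List.pyGet? url (i' : Int) = some '.' then
      if count > 3 then PySem.List.slice url (some ((i' : Int) + 1)) (some last_period)
      else aLoop url i' 0 (i' : Int)
    else aLoop url i' (count + 1) last_period

def get_significant_name_from_url (url : String) : String :=
  String.ofList (aLoop url.toList url.toList.length 0 (url.toList.length : Int))

-- ===== PORT B =====
-- 'for part in reversed(parts): if len(part) > 3: return part' as a recursion with early return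
def bFind : List (List Char) → Option (List Char)
  | [] => none
  | p :: rest => if 3 < PySem.Chars.len p then some p else bFind rest

def get_significant_name_from_url_alt (url : String) : String :=
  let parts := PySem.Chars.splitOn url.toList ['.']
  match bFind parts.reverse with
  | some p => String.ofList p
  | none => url

-- ===== PRECONDITION & SPEC =====
def Spec_get_significant_name_from_url (url : String) (out : String) : Prop := out = get_significant_name_from_url_alt url
instance (url : String) (out : String) : Decidable (Spec_get_significant_name_from_url url out) := by unfold Spec_get_significant_name_from_url; infer_instance

-- ===== CLAIM (what is proved, stated in full; the proofs are below) =====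
def Claim_equal_get_significant_name_from_url : Prop := ∀ (url : String), Dom_get_significant_name_from_url url → Spec_get_significant_name_from_url url (get_significant_name_from_url url)

-- ===== LEMMAS AND PROOFS =====

-- fuel-free split on '.' : (first piece, remaining pieces)
def dsplit : List Char → List Char × List (List Char)
  | [] => ([], [])
  | c :: r =>
    let (p, ps) := dsplit r
    if c = '.' then ([], p :: ps) else (c :: p, ps)

theorem go_eq (l : List Char) : ∀ (fuel : Nat) (cur : List Char) (acc : List (List Char)),
    l.length ≤ fuel →
    PySem.Chars.splitOn.go ['.'] fuel l cur acc
      = acc.reverse ++ (cur.reverse ++ (dsplit l).1) :: (dsplit l).2 := by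
  induction l with
  | nil =>
    intro fuel cur acc _
    cases fuel <;> simp [PySem.Chars.splitOn.go, dsplit]
  | cons c r ih =>
    intro fuel cur acc h
    cases fuel with
    | zero => simp at h
    | succ f =>
      simp only [PySem.Chars.splitOn.go]
      by_cases hc : c = '.'
      · subst hc
        simp [List.isPrefixOf, ih f [] (cur.reverse :: acc) (by simpa using h), dsplit]
      · simp [List.isPrefixOf, hc, ih f (c :: cur) acc (by simpa using h), dsplit]
        exact fun h' => absurd h'.symm hc

theorem splitOn_eq (l : List Char) :
    PySem.Chars.splitOn l ['.'] = (dsplit l).1 :: (dsplit l).2 := by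
  simpa using go_eq l (l.length + 1) [] [] (by omega)

theorem dsplit_no_dot (seg : List Char) (h : ∀ c ∈ seg, c ≠ '.') :
    dsplit seg = (seg, []) := by
  induction seg with
  | nil => simp [dsplit]
  | cons c r ih =>
    have hc : c ≠ '.' := h c (by simp)
    simp [dsplit, hc, ih (fun x hx => h x (by simp [hx]))]

theorem dsplit_append_dot (xs seg : List Char) (h : ∀ c ∈ seg, c ≠ '.') :
    dsplit (xs ++ '.' :: seg) = ((dsplit xs).1, (dsplit xs).2 ++ [seg]) := by
  induction xs with
  | nil => simp [dsplit, dsplit_no_dot seg h]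
  | cons c r ih =>
    by_cases hc : c = '.' <;> simp [dsplit, hc, ih]

-- A's scan, reformulated over the reversed char list with the current segment as accumulator
def segScan : List Char → List Char → Option (List Char)
  | [], seg => if 3 < seg.length then some seg else none
  | c :: r, seg =>
    if c = '.' then (if 3 < seg.length then some seg else segScan r [])
    else segScan r (c :: seg)

theorem bFind_eq_find? (ps : List (List Char)) :
    bFind ps = ps.find? (fun p => decide (3 < p.length)) := by
  induction ps with
  | nil => rfl
  | cons p rest ih =>
    by_cases hp : 3 < p.length <;>
      simp [bFind, List.find?, PySem.Chars.len_eq, hp, ih]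

theorem segScan_eq (r : List Char) : ∀ (seg : List Char), (∀ c ∈ seg, c ≠ '.') →
    segScan r seg
      = ((dsplit (r.reverse ++ seg)).1 :: (dsplit (r.reverse ++ seg)).2).reverse.find?
          (fun p => decide (3 < p.length)) := by
  induction r with
  | nil =>
    intro seg h
    by_cases hl : 3 < seg.length <;>
      simp [segScan, dsplit_no_dot seg h, hl]
  | cons c r ih =>
    intro seg h
    by_cases hc : c = '.'
    · subst hc
      rw [show ('.' :: r).reverse ++ seg = r.reverse ++ '.' :: seg by simp]
      rw [dsplit_append_dot r.reverse seg h]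
      by_cases hl : 3 < seg.length
      · simp [segScan, hl]
      · simp only [segScan, if_neg hl]
        rw [ih [] (by simp)]
        simp [hl]
    · rw [show (c :: r).reverse ++ seg = r.reverse ++ c :: seg by simp]
      rw [segScan, if_neg hc, ih (c :: seg) (by
        intro x hx
        rcases List.mem_cons.mp hx with h1 | h1
        · simpa [h1] using hc
        · exact h x h1)]

theorem aLoop_eq (l : List Char) : ∀ (K lp : Nat), K ≤ lp → lp ≤ l.length →
    (∀ c ∈ (l.drop K).take (lp - K), c ≠ '.') →
    aLoop l K (((lp - K : Nat) : Int)) ((lp : Nat) : Int)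
      = (segScan (l.take K).reverse ((l.drop K).take (lp - K))).getD l := by
  intro K
  induction K with
  | zero =>
    intro lp hK hlen hseg
    have hlt : (l.take lp).length = lp := by simp [Nat.min_eq_left hlen]
    simp only [aLoop, List.drop_zero, Nat.sub_zero, List.take_zero, List.reverse_nil, segScan]
    by_cases h3 : 3 < lp
    · rw [if_pos (by exact_mod_cast h3 : ((lp : Nat) : Int) > 3),
          if_pos (by rw [hlt]; omega : 3 < (l.take lp).length),
          PySem.List.slice_zero_start, PySem.List.slice_to_natCast]
      simp
    · rw [if_neg (by exact_mod_cast h3 : ¬ ((lp : Nat) : Int) > 3),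
          if_neg (by rw [hlt]; omega : ¬ 3 < (l.take lp).length)]
      rfl
  | succ K ih =>
    intro lp hK hlen hseg
    have hKlt : K < l.length := by omega
    have hget : PySem.List.pyGet? l ((K : Nat) : Int) = some l[K] := by
      simp [List.getElem?_eq_getElem hKlt]
    have htake : (l.take (K + 1)).reverse = l[K] :: (l.take K).reverse := by
      rw [List.take_add_one]
      simp [List.getElem?_eq_getElem hKlt]
    have hseglen : ((l.drop (K+1)).take (lp - (K+1))).length = lp - (K + 1) := by
      simp; omega
    by_cases hdot : l[K] = '.'
    · simp only [aLoop, hget, hdot, if_true]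
      rw [htake, hdot]
      simp only [segScan, if_true]
      by_cases h3 : ((lp - (K+1) : Nat) : Int) > 3
      · rw [if_pos h3,
          if_pos (by rw [hseglen]; omega : 3 < ((l.drop (K+1)).take (lp - (K+1))).length)]
        rw [show ((K:Nat):Int) + 1 = (((K+1 : Nat)):Int) by push_cast; ring]
        rw [PySem.List.slice_natCast]
        simp
      · rw [if_neg h3,
          if_neg (by rw [hseglen]; omega : ¬ 3 < ((l.drop (K+1)).take (lp - (K+1))).length)]
        have := ih K le_rfl (by omega) (by simp)
        simpa using this
    · have hdrop : (l.drop K).take (lp - K) = l[K] :: (l.drop (K+1)).take (lp - (K+1)) := by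
        rw [List.drop_eq_getElem_cons hKlt,
            show lp - K = (lp - (K+1)) + 1 by omega, List.take_succ_cons]
      simp only [aLoop, hget, Option.some.injEq]
      rw [if_neg hdot]
      rw [show ((lp - (K+1) : Nat) : Int) + 1 = ((lp - K : Nat) : Int) by omega]
      rw [ih lp (by omega) hlen (by
        intro c hc
        rw [hdrop] at hc
        rcases List.mem_cons.mp hc with h1 | h1
        · simpa [h1] using hdot
        · exact hseg c h1)]
      rw [htake, hdrop]
      simp only [segScan]
      rw [if_neg hdot]

-- ===== VERDICT (by name: the statement is the Claim_ definition above) =====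
theorem get_significant_name_from_url_spec : Claim_equal_get_significant_name_from_url := by
  intro url _
  unfold Spec_get_significant_name_from_url
  simp only [get_significant_name_from_url, get_significant_name_from_url_alt]
  set l := url.toList with hl
  have hA := aLoop_eq l l.length l.length le_rfl le_rfl (by simp)
  simp only [Nat.sub_self, Nat.cast_zero] at hA
  rw [hA]
  have hseg := segScan_eq l.reverse [] (by simp)
  simp only [List.reverse_reverse, List.append_nil] at hseg
  simp only [List.take_length, List.drop_length, List.take_zero, hseg]
  rw [splitOn_eq, bFind_eq_find?]
  cases hF : ((dsplit l).1 :: (dsplit l).2).reverse.find? (fun p => decide (3 < p.length)) with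
  | none => simp [hl, String.ofList_toList]
  | some p => simp
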